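-- pv_equiv track=rewrite | github.com/Joacim-S/AdventOfCode23 | days/d4_2.py | calculate
-- ===== SOURCE A (Python) =====
-- def calculate(data):
--     cards = {}
--     for row in data:
--         if not row:
--             break
--         row = row.split(':')
--         card = int(row[0][5:])
--         numbers = row[1].split('|')
--         winners = get_numbers(numbers[0])
--         my_numbers = get_numbers(numbers[1])
--         wins = get_wins(my_numbers, winners)
--         cards[card] = [1, wins]
--     return get_total(cards)
--
-- def get_total(cards):
--     total = 0
--     for number, card in cards.items():
--         for i in range(card[1]):
--             if number + i + 1 in cards:
--                 cards[number + i + 1][0] += card[0]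
--         total += card[0]
--     return total
--
-- def get_wins(numbers, winners):
--     wins = 0
--     for n in numbers:
--         if n in winners:
--             wins += 1
--
--     return wins
--
-- def get_numbers(number_string):
--     numbers = set(filter(lambda number: number, number_string.split(' ')))
--     return numbers
-- ===== SOURCE B (Python) =====
-- def calculate(data):
--     cards = []
--     for row in data:
--         if not row:
--             break
--         parts = row.split(':')
--         card = int(parts[0][5:])
--         segs = parts[1].split('|')
--         winners = {t for t in segs[0].split(' ') if t}
--         mine = {t for t in segs[1].split(' ') if t}
--         cards.append((card, len(mine & winners)))
--     counts = []
--     for card, _ in cards: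
--         counts.append(1 + sum(c for (c2, w2), c in zip(cards, counts) if 0 < card - c2 <= w2))
--     return sum(counts)
-- ===== Notes on version B (the rewrite author's own statement) =====
-- stated objective: alternative
-- what changed: A pushes copy counts forward by mutating later cards' accumulators in a dict while iterating; B parses into a plain list and computes each card's multiplicity by a pull recurrence reading the already-finalized counts of earlier cards (wins via set intersection instead of a membership-counting loop), then sums.
-- outside the precondition, e.g. on calculate(['Card 1: 1 | 1', 'Card 1: 2 | 3']): A returns 1, B returns 2
import Mathlib
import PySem

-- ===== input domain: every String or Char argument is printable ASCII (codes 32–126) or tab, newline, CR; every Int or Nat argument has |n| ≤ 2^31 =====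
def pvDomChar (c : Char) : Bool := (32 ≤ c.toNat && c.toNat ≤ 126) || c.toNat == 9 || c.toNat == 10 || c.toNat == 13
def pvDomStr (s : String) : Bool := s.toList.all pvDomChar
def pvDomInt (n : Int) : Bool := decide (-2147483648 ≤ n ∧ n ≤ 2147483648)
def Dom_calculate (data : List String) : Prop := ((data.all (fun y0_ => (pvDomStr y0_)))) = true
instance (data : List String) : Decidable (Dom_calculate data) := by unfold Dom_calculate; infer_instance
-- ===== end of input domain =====

-- B replaces A's forward-push mutation of per-card copy counters (a dict whose later entries
-- are incremented while iterating) by a pull recurrence: each card's multiplicity is computed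
-- once from the already-finalized counts of earlier cards, then all counts are summed
-- (objective: alternative decomposition, same asymptotic cost).

-- ===== PORT A =====
-- get_numbers: set(filter(lambda number: number, number_string.split(' ')))
def pyGetNumbers (s : String) : PySem.Set String :=
  PySem.Set.ofList (((PySem.Str.split? s " ").getD []).filter (fun t => t ≠ ""))

-- get_wins: count members of `numbers` that are in `winners`
def pyGetWins (numbers winners : PySem.Set String) : Int :=
  List.foldl (fun w n => if PySem.Set.contains winners n then w + 1 else w) 0 numbers

-- the parsing loop of calculate (break on the first empty row)
def pyParse : List String → PySem.Dict Int (Int × Int) → PySem.Dict Int (Int × Int)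
  | [], cards => cards
  | row :: rest, cards =>
    if row = "" then cards
    else
      let parts := (PySem.Str.split? row ":").getD []
      let card := (PySem.Int.ofStr? (PySem.Str.slice (parts.getD 0 "") (some 5) none)).getD 0
      let numbers := (PySem.Str.split? (parts.getD 1 "") "|").getD []
      let winners := pyGetNumbers (numbers.getD 0 "")
      let myNumbers := pyGetNumbers (numbers.getD 1 "")
      let wins := pyGetWins myNumbers winners
      pyParse rest (cards.insert card (1, wins))

-- get_total: iterate the dict in key order, pushing each card's current count forward
-- (the loop body, one card visit, as a named helper)
def pyGetTotalStep (st : PySem.Dict Int (Int × Int) × Int) (number : Int) :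
    PySem.Dict Int (Int × Int) × Int :=
  let card := st.1.getD number (0, 0)
  let cs := List.foldl (fun cs i =>
      if cs.contains (number + i + 1) then
        cs.modify (number + i + 1) (0, 0) (fun p => (p.1 + card.1, p.2))
      else cs) st.1 (PySem.List.pyRange 0 card.2)
  (cs, st.2 + card.1)

def pyGetTotal (cards : PySem.Dict Int (Int × Int)) : Int :=
  (List.foldl pyGetTotalStep (cards, 0) cards.keys).2

def calculate (data : List String) : Int :=
  pyGetTotal (pyParse data PySem.Dict.empty)

-- ===== PORT B =====
-- parsing loop of B: list of (card, wins), wins = len(mine & winners)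
def altParse : List String → List (Int × Int) → List (Int × Int)
  | [], cards => cards
  | row :: rest, cards =>
    if row = "" then cards
    else
      let parts := (PySem.Str.split? row ":").getD []
      let card := (PySem.Int.ofStr? (PySem.Str.slice (parts.getD 0 "") (some 5) none)).getD 0
      let segs := (PySem.Str.split? (parts.getD 1 "") "|").getD []
      let winners := PySem.Set.ofList (((PySem.Str.split? (segs.getD 0 "") " ").getD []).filter (fun t => t ≠ ""))
      let mine := PySem.Set.ofList (((PySem.Str.split? (segs.getD 1 "") " ").getD []).filter (fun t => t ≠ ""))
      altParse rest (cards ++ [(card, PySem.Set.len (PySem.Set.inter mine winners))])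

-- counts[i] = 1 + sum of counts[j] for earlier cards j whose win range reaches card i
def altCounts (cards : List (Int × Int)) : List Int :=
  List.foldl (fun counts cw =>
    counts ++ [1 + List.foldl (fun s p =>
        if 0 < cw.1 - p.1.1 ∧ cw.1 - p.1.1 ≤ p.1.2 then s + p.2 else s) 0 (cards.zip counts)])
    [] cards

def calculate_alt (data : List String) : Int :=
  (altCounts (altParse data [])).sum

-- ===== PRECONDITION & SPEC =====
-- helpers for Pre_ (independent of both ports)
def pvRowKey (row : String) : Int :=
  (PySem.Int.ofStr? (PySem.Str.slice (((PySem.Str.split? row ":").getD []).getD 0 "") (some 5) none)).getD 0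

def pvRowOk (row : String) : Bool :=
  let parts := (PySem.Str.split? row ":").getD []
  decide (2 ≤ parts.length) &&
  (PySem.Int.ofStr? (PySem.Str.slice (parts.getD 0 "") (some 5) none)).isSome &&
  decide (2 ≤ ((PySem.Str.split? (parts.getD 1 "") "|").getD []).length)

-- Pre_ excludes (a) rows before the first empty row on which A raises (no ':' or no '|'
-- separator, or a card header int() cannot parse), and (b) inputs with duplicate card
-- numbers, on which A's dict overwrite silently discards an entire earlier card — an
-- accidental corner where B's per-row list is as defensible as A's dict reinsertion.
def Pre_calculate (data : List String) : Prop :=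
  (data.takeWhile (fun r => r ≠ "")).all pvRowOk = true ∧
  ((data.takeWhile (fun r => r ≠ "")).map pvRowKey).Nodup

instance (data : List String) : Decidable (Pre_calculate data) := by
  unfold Pre_calculate; infer_instance

def pvWitness_calculate : List String :=
  ["Card 1: 1 2 | 2 3 1", "Card 2: 5 | 9", "", "ignored"]

def Spec_calculate (data : List String) (out : Int) : Prop := out = calculate_alt data
instance (data : List String) (out : Int) : Decidable (Spec_calculate data out) := by unfold Spec_calculate; infer_instance

-- ===== CLAIM (what is proved, stated in full; the proofs are below) =====
def Claim_equal_calculate : Prop := ∀ (data : List String), Dom_calculate data → Pre_calculate data → Spec_calculate data (calculate data)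

-- ===== LEMMAS AND PROOFS =====

-- per-row values as A computes them
def rowCardA (row : String) : Int :=
  (PySem.Int.ofStr? (PySem.Str.slice (((PySem.Str.split? row ":").getD []).getD 0 "") (some 5) none)).getD 0

def rowWinsA (row : String) : Int :=
  let parts := (PySem.Str.split? row ":").getD []
  let numbers := (PySem.Str.split? (parts.getD 1 "") "|").getD []
  pyGetWins (pyGetNumbers (numbers.getD 1 "")) (pyGetNumbers (numbers.getD 0 ""))

-- per-row wins as B computes them
def rowWinsB (row : String) : Int :=
  let parts := (PySem.Str.split? row ":").getD []
  let segs := (PySem.Str.split? (parts.getD 1 "") "|").getD []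
  PySem.Set.len (PySem.Set.inter
    (PySem.Set.ofList (((PySem.Str.split? (segs.getD 1 "") " ").getD []).filter (fun t => t ≠ "")))
    (PySem.Set.ofList (((PySem.Str.split? (segs.getD 0 "") " ").getD []).filter (fun t => t ≠ ""))))

theorem pvRowKey_eq_rowCardA : pvRowKey = rowCardA := rfl

-- counting loop = length of the filtered list
theorem foldl_count_eq (winners : PySem.Set String) :
    ∀ (l : List String) (init : Int),
      List.foldl (fun w n => if PySem.Set.contains winners n then w + 1 else w) init l
        = init + ((l.filter (fun n => PySem.Set.contains winners n)).length : Int) := by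
  intro l
  induction l with
  | nil => intro init; simp
  | cons x t ih =>
    intro init
    rw [List.foldl_cons, List.filter_cons]
    by_cases h : PySem.Set.contains winners x = true
    · rw [if_pos h, if_pos h, ih]
      rw [List.length_cons]
      push_cast
      ring
    · rw [if_neg h, if_neg h, ih]

theorem wins_eq (row : String) : rowWinsA row = rowWinsB row := by
  unfold rowWinsA rowWinsB pyGetWins pyGetNumbers
  rw [foldl_count_eq]
  unfold PySem.Set.inter PySem.Set.len PySem.Set.contains
  rw [zero_add]

-- A's parse loop is a fold of inserts over the prefix before the first empty row
theorem pyParse_eq (data : List String) : ∀ (cards : PySem.Dict Int (Int × Int)),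
    pyParse data cards
      = List.foldl (fun cs row => cs.insert (rowCardA row) (1, rowWinsA row)) cards
          (data.takeWhile (fun r => r ≠ "")) := by
  induction data with
  | nil => intro cards; simp [pyParse]
  | cons row rest ih =>
    intro cards
    by_cases h : row = ""
    · simp [pyParse, h]
    · simp only [pyParse, h, if_false, List.takeWhile_cons, ne_eq,
        not_false_eq_true, decide_true]
      rw [ih]
      rfl

-- B's parse loop appends per-row pairs over the same prefix
theorem altParse_eq (data : List String) : ∀ (cards : List (Int × Int)),
    altParse data cards
      = cards ++ (data.takeWhile (fun r => r ≠ "")).map (fun row => (rowCardA row, rowWinsB row)) := by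
  induction data with
  | nil => intro cards; simp [altParse]
  | cons row rest ih =>
    intro cards
    by_cases h : row = ""
    · simp [altParse, h]
    · simp only [altParse, h, if_false, List.takeWhile_cons, ne_eq,
        not_false_eq_true, decide_true]
      rw [ih, List.append_assoc]
      rfl

-- ---- the push/pull engine ----

-- effect of one card's push on a later entry (key, count, wins)
def bumpE (c w a : Int) (e : Int × Int × Int) : Int × Int × Int :=
  if 0 < e.1 - c ∧ e.1 - c ≤ w then (e.1, e.2.1 + a, e.2.2) else e

-- value A's get_total loop accumulates, expressed purely on an entry list
def pureSum : List (Int × Int × Int) → Int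
  | [] => 0
  | e :: tl => e.2.1 + pureSum (tl.map (bumpE e.1 e.2.2 e.2.1))
termination_by es => es.length
decreasing_by simp

theorem bumpE_fst (c w a : Int) (e : Int × Int × Int) : (bumpE c w a e).1 = e.1 := by
  unfold bumpE; split <;> rfl

theorem bumpE_wins (c w a : Int) (e : Int × Int × Int) : (bumpE c w a e).2.2 = e.2.2 := by
  unfold bumpE; split <;> rfl

-- the inner push loop never changes which keys exist
theorem inner_contains (number a : Int) :
    ∀ (L : List Int) (d : PySem.Dict Int (Int × Int)) (k : Int),
      (List.foldl (fun cs i =>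
          if cs.contains (number + i + 1) then
            cs.modify (number + i + 1) (0, 0) (fun p => (p.1 + a, p.2))
          else cs) d L).contains k = d.contains k := by
  intro L
  induction L with
  | nil => intro d k; rfl
  | cons i t ih =>
    intro d k
    rw [List.foldl_cons]
    by_cases h : d.contains (number + i + 1) = true
    · rw [if_pos h, ih]
      rw [PySem.Dict.contains_modify]
      by_cases hk : k = number + i + 1
      · subst hk; simp [h]
      · simp [hk]
    · rw [if_neg h, ih]

-- the inner push loop leaves untargeted values unchanged
theorem inner_getD_notmem (number a : Int) :
    ∀ (L : List Int) (d : PySem.Dict Int (Int × Int)) (k : Int),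
      (k - number - 1) ∉ L →
      (List.foldl (fun cs i =>
          if cs.contains (number + i + 1) then
            cs.modify (number + i + 1) (0, 0) (fun p => (p.1 + a, p.2))
          else cs) d L).getD k (0, 0) = d.getD k (0, 0) := by
  intro L
  induction L with
  | nil => intro d k _; rfl
  | cons i t ih =>
    intro d k hmem
    have hknei : k ≠ number + i + 1 := by
      intro hk
      have hi : k - number - 1 = i := by omega
      exact hmem (hi ▸ List.mem_cons_self)
    rw [List.foldl_cons]
    have htl : (k - number - 1) ∉ t := fun h => hmem (List.mem_cons_of_mem _ h)
    by_cases h : d.contains (number + i + 1) = true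
    · rw [if_pos h, ih _ _ htl, PySem.Dict.getD_modify, if_neg hknei]
    · rw [if_neg h, ih _ _ htl]

-- the inner push loop bumps each targeted, present value exactly once
theorem inner_getD_mem (number a : Int) :
    ∀ (L : List Int), L.Nodup →
      ∀ (d : PySem.Dict Int (Int × Int)) (k : Int),
      (k - number - 1) ∈ L → d.contains k = true →
      (List.foldl (fun cs i =>
          if cs.contains (number + i + 1) then
            cs.modify (number + i + 1) (0, 0) (fun p => (p.1 + a, p.2))
          else cs) d L).getD k (0, 0)
        = ((d.getD k (0, 0)).1 + a, (d.getD k (0, 0)).2) := by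
  intro L
  induction L with
  | nil => intro _ d k hmem _; simp at hmem
  | cons i t ih =>
    intro hnd d k hmem hc
    obtain ⟨hit, hndt⟩ := List.nodup_cons.mp hnd
    rw [List.foldl_cons]
    rcases List.mem_cons.mp hmem with hki | hkt
    · have hk : k = number + i + 1 := by omega
      have hc' : d.contains (number + i + 1) = true := by rw [← hk]; exact hc
      rw [if_pos hc']
      have hnt : (k - number - 1) ∉ t := by rw [hki]; exact hit
      rw [inner_getD_notmem _ _ _ _ _ hnt, PySem.Dict.getD_modify, if_pos hk, ← hk]
    · have hknei : k ≠ number + i + 1 := by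
        intro hk
        apply hit
        have : k - number - 1 = i := by omega
        rw [← this]; exact hkt
      by_cases h : d.contains (number + i + 1) = true
      · rw [if_pos h]
        have hc' : (d.modify (number + i + 1) (0, 0) (fun p => (p.1 + a, p.2))).contains k = true := by
          rw [PySem.Dict.contains_modify]
          simp [hc]
        rw [ih hndt _ _ hkt hc', PySem.Dict.getD_modify, if_neg hknei]
      · rw [if_neg h]
        exact ih hndt _ _ hkt hc

theorem bumpE_cnt (c w a : Int) (e : Int × Int × Int) :
    (bumpE c w a e).2.1 = e.2.1 + (if 0 < e.1 - c ∧ e.1 - c ≤ w then a else 0) := by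
  unfold bumpE; split
  · rfl
  · simp

-- A's get_total loop over the keys equals pureSum of the entry list
theorem outerA :
    ∀ (n : Nat) (rest : List (Int × Int × Int)), rest.length ≤ n →
      ∀ (d : PySem.Dict Int (Int × Int)) (total : Int),
      (∀ e ∈ rest, d.contains e.1 = true) →
      (∀ e ∈ rest, d.getD e.1 (0, 0) = (e.2.1, e.2.2)) →
      (rest.map (·.1)).Nodup →
      (List.foldl pyGetTotalStep (d, total) (rest.map (·.1))).2 = total + pureSum rest := by
  intro n
  induction n with
  | zero =>
    intro rest hlen d total _ _ _
    rw [List.length_eq_zero_iff.mp (Nat.le_zero.mp hlen)]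
    simp [pureSum]
  | succ n ihn =>
    intro rest hlen d total hc hv hnd
    cases rest with
    | nil => simp [pureSum]
    | cons e tl =>
    have ih := fun d' total' h1 h2 h3 =>
      ihn (tl.map (bumpE e.1 e.2.2 e.2.1)) (by simpa using Nat.le_of_succ_le_succ (by simpa using hlen)) d' total' h1 h2 h3
    have hve : d.getD e.1 (0, 0) = (e.2.1, e.2.2) := hv e List.mem_cons_self
    have hstep : pyGetTotalStep (d, total) e.1 =
        (List.foldl (fun cs i =>
            if cs.contains (e.1 + i + 1) then
              cs.modify (e.1 + i + 1) (0, 0) (fun p => (p.1 + e.2.1, p.2))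
            else cs) d (PySem.List.pyRange 0 e.2.2), total + e.2.1) := by
      unfold pyGetTotalStep
      rw [hve]
    rw [List.map_cons, List.foldl_cons, hstep]
    set cs := List.foldl (fun cs i =>
        if cs.contains (e.1 + i + 1) then
          cs.modify (e.1 + i + 1) (0, 0) (fun p => (p.1 + e.2.1, p.2))
        else cs) d (PySem.List.pyRange 0 e.2.2) with hcs
    have hkeys : (tl.map (bumpE e.1 e.2.2 e.2.1)).map (·.1) = tl.map (·.1) := by
      rw [List.map_map]
      exact List.map_congr_left (fun x _ => bumpE_fst e.1 e.2.2 e.2.1 x)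
    have hcontains : ∀ k, cs.contains k = d.contains k := fun k =>
      inner_contains e.1 e.2.1 (PySem.List.pyRange 0 e.2.2) d k
    have hc' : ∀ e' ∈ tl.map (bumpE e.1 e.2.2 e.2.1), cs.contains e'.1 = true := by
      intro e' he'
      obtain ⟨x, hx, hxe⟩ := List.mem_map.mp he'
      rw [← hxe, bumpE_fst, hcontains]
      exact hc x (List.mem_cons_of_mem _ hx)
    have hv' : ∀ e' ∈ tl.map (bumpE e.1 e.2.2 e.2.1), cs.getD e'.1 (0, 0) = (e'.2.1, e'.2.2) := by
      intro e' he'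
      obtain ⟨x, hx, hxe⟩ := List.mem_map.mp he'
      have hcx : d.contains x.1 = true := hc x (List.mem_cons_of_mem _ hx)
      have hvx : d.getD x.1 (0, 0) = (x.2.1, x.2.2) := hv x (List.mem_cons_of_mem _ hx)
      rw [← hxe, bumpE_fst]
      by_cases hedge : 0 < x.1 - e.1 ∧ x.1 - e.1 ≤ e.2.2
      · have hmem : (x.1 - e.1 - 1) ∈ PySem.List.pyRange 0 e.2.2 := by
          rw [PySem.List.mem_pyRange_one]; omega
        rw [hcs, inner_getD_mem e.1 e.2.1 _ (PySem.List.nodup_pyRange_one 0 e.2.2) d x.1 hmem hcx,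
          hvx]
        unfold bumpE
        rw [if_pos hedge]
      · have hmem : (x.1 - e.1 - 1) ∉ PySem.List.pyRange 0 e.2.2 := by
          rw [PySem.List.mem_pyRange_one]; omega
        rw [hcs, inner_getD_notmem e.1 e.2.1 _ d x.1 hmem, hvx]
        unfold bumpE
        rw [if_neg hedge]
    have hnd' : ((tl.map (bumpE e.1 e.2.2 e.2.1)).map (·.1)).Nodup := by
      rw [hkeys]
      exact (List.nodup_cons.mp (by simpa using hnd)).2
    rw [← hkeys, ih cs (total + e.2.1) hc' hv' hnd']
    have hps : pureSum (e :: tl) = e.2.1 + pureSum (tl.map (bumpE e.1 e.2.2 e.2.1)) := by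
      rw [pureSum]
    rw [hps]
    ring

-- accumulated pull sum over processed cards (key, wins, count)
def accSum (c : Int) (acc : List (Int × Int × Int)) : Int :=
  List.foldl (fun s p => if 0 < c - p.1 ∧ c - p.1 ≤ p.2.1 then s + p.2.2 else s) 0 acc

-- pull counts: remaining entries are (key, base, wins)
def pulls (acc : List (Int × Int × Int)) : List (Int × Int × Int) → List Int
  | [] => []
  | e :: tl => (e.2.1 + accSum e.1 acc) :: pulls (acc ++ [(e.1, e.2.2, e.2.1 + accSum e.1 acc)]) tl

theorem accSum_shift (c : Int) :
    ∀ (l : List (Int × Int × Int)) (s : Int),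
      List.foldl (fun s p => if 0 < c - p.1 ∧ c - p.1 ≤ p.2.1 then s + p.2.2 else s) s l
        = s + List.foldl (fun s p => if 0 < c - p.1 ∧ c - p.1 ≤ p.2.1 then s + p.2.2 else s) 0 l := by
  intro l
  induction l with
  | nil => intro s; simp
  | cons p t ih =>
    intro s
    rw [List.foldl_cons, List.foldl_cons]
    by_cases h : 0 < c - p.1 ∧ c - p.1 ≤ p.2.1
    · rw [if_pos h, if_pos h, ih (s + p.2.2), ih (0 + p.2.2)]
      ring
    · rw [if_neg h, if_neg h, ih]

theorem accSum_append (c : Int) (l1 l2 : List (Int × Int × Int)) :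
    accSum c (l1 ++ l2) = accSum c l1 + accSum c l2 := by
  unfold accSum
  rw [List.foldl_append, accSum_shift]

theorem accSum_single (c a w pc : Int) :
    accSum c [(a, w, pc)] = if 0 < c - a ∧ c - a ≤ w then pc else 0 := by
  unfold accSum
  rw [List.foldl_cons]
  by_cases h : 0 < c - a ∧ c - a ≤ w
  · rw [if_pos h, if_pos h]; simp
  · rw [if_neg h, if_neg h]; rfl

theorem pulls_bump (c w pc : Int) (acc1 : List (Int × Int × Int)) :
    ∀ (tl : List (Int × Int × Int)) (acc2 : List (Int × Int × Int)),
      pulls (acc1 ++ (c, w, pc) :: acc2) tl = pulls (acc1 ++ acc2) (tl.map (bumpE c w pc)) := by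
  intro tl
  induction tl with
  | nil => intro acc2; rfl
  | cons e t ih =>
    intro acc2
    rw [List.map_cons]
    simp only [pulls]
    have hacc : accSum e.1 (acc1 ++ (c, w, pc) :: acc2)
        = accSum e.1 (acc1 ++ acc2) + (if 0 < e.1 - c ∧ e.1 - c ≤ w then pc else 0) := by
      have h1 : acc1 ++ (c, w, pc) :: acc2 = (acc1 ++ [(c, w, pc)]) ++ acc2 := by simp
      rw [h1, accSum_append, accSum_append, accSum_append, accSum_single]
      ring
    have h3 : (bumpE c w pc e).2.1 + accSum (bumpE c w pc e).1 (acc1 ++ acc2)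
        = e.2.1 + accSum e.1 (acc1 ++ (c, w, pc) :: acc2) := by
      rw [bumpE_fst, bumpE_cnt, hacc]
      ring
    rw [bumpE_fst c w pc e, bumpE_wins c w pc e, bumpE_cnt c w pc e, hacc]
    congr 1
    · ring
    · have h4 : e.2.1 + (if 0 < e.1 - c ∧ e.1 - c ≤ w then pc else 0) + accSum e.1 (acc1 ++ acc2)
          = e.2.1 + (accSum e.1 (acc1 ++ acc2) + (if 0 < e.1 - c ∧ e.1 - c ≤ w then pc else 0)) := by
        ring
      rw [h4]
      have h5 : (acc1 ++ (c, w, pc) :: acc2)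
            ++ [(e.1, e.2.2, e.2.1 + (accSum e.1 (acc1 ++ acc2) + (if 0 < e.1 - c ∧ e.1 - c ≤ w then pc else 0)))]
          = acc1 ++ (c, w, pc)
            :: (acc2 ++ [(e.1, e.2.2, e.2.1 + (accSum e.1 (acc1 ++ acc2) + (if 0 < e.1 - c ∧ e.1 - c ≤ w then pc else 0)))]) := by
        simp
      rw [h5, ih]
      rw [List.append_assoc]

theorem pureSum_eq_pulls :
    ∀ (n : Nat) (es : List (Int × Int × Int)), es.length ≤ n →
      pureSum es = (pulls [] es).sum := by
  intro n
  induction n with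
  | zero =>
    intro es hlen
    rw [List.length_eq_zero_iff.mp (Nat.le_zero.mp hlen)]
    simp [pureSum, pulls]
  | succ n ihn =>
    intro es hlen
    cases es with
    | nil => simp [pureSum, pulls]
    | cons e tl =>
      rw [pureSum]
      simp only [pulls]
      have h0 : accSum e.1 ([] : List (Int × Int × Int)) = 0 := rfl
      rw [h0, add_zero, List.sum_cons]
      have h1 : ([(e.1, e.2.2, e.2.1)] : List (Int × Int × Int)) = [] ++ (e.1, e.2.2, e.2.1) :: [] := by simp
      have h2 : pulls [(e.1, e.2.2, e.2.1)] tl = pulls [] (tl.map (bumpE e.1 e.2.2 e.2.1)) := by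
        rw [h1, pulls_bump]
        rfl
      rw [List.nil_append, h2, ← ihn _ (by simpa using Nat.le_of_succ_le_succ (by simpa using hlen))]

theorem altCounts_go (cards : List (Int × Int)) :
    ∀ (suffix prefixc : List (Int × Int)) (counts : List Int),
      cards = prefixc ++ suffix → counts.length = prefixc.length →
      List.foldl (fun counts cw =>
          counts ++ [1 + List.foldl (fun s p =>
              if 0 < cw.1 - p.1.1 ∧ cw.1 - p.1.1 ≤ p.1.2 then s + p.2 else s) 0 (cards.zip counts)])
        counts suffix
        = counts ++ pulls ((prefixc.zip counts).map (fun q => (q.1.1, q.1.2, q.2)))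
            (suffix.map (fun cw => (cw.1, 1, cw.2))) := by
  intro suffix
  induction suffix with
  | nil => intro p counts _ _; simp [pulls]
  | cons cw suffix ih =>
    intro prefixc counts hcards hlen
    rw [List.foldl_cons, List.map_cons]
    have hzip : cards.zip counts = prefixc.zip counts := by
      rw [hcards]
      conv_lhs => rw [show counts = counts ++ [] by simp]
      rw [List.zip_append hlen.symm]
      simp
    have hinner : List.foldl (fun s p =>
          if 0 < cw.1 - p.1.1 ∧ cw.1 - p.1.1 ≤ p.1.2 then s + p.2 else s) 0 (cards.zip counts)
        = accSum cw.1 ((prefixc.zip counts).map (fun q => (q.1.1, q.1.2, q.2))) := by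
      rw [hzip]
      unfold accSum
      rw [List.foldl_map]
    rw [hinner]
    simp only [pulls]
    rw [ih (prefixc ++ [cw])
      (counts ++ [1 + accSum cw.1 ((prefixc.zip counts).map (fun q => (q.1.1, q.1.2, q.2)))])
      (by rw [hcards]; simp) (by simp [hlen])]
    have hz2 : (prefixc ++ [cw]).zip
          (counts ++ [1 + accSum cw.1 ((prefixc.zip counts).map (fun q => (q.1.1, q.1.2, q.2)))])
        = prefixc.zip counts
          ++ [(cw, 1 + accSum cw.1 ((prefixc.zip counts).map (fun q => (q.1.1, q.1.2, q.2))))] := by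
      rw [List.zip_append hlen.symm]
      rfl
    rw [hz2, List.map_append]
    simp [List.append_assoc]

theorem altCounts_eq_pulls (cards : List (Int × Int)) :
    altCounts cards = pulls [] (cards.map (fun cw => (cw.1, 1, cw.2))) := by
  unfold altCounts
  have h := altCounts_go cards cards [] [] (by simp) rfl
  simpa using h

-- ===== VERDICT (by name: the statement is the Claim_ definition above) =====
theorem calculate_spec : Claim_equal_calculate := by
  intro data _ hpre
  unfold Spec_calculate
  obtain ⟨_, hnd⟩ := hpre
  set L := data.takeWhile (fun r => r ≠ "") with hL
  unfold calculate pyGetTotal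
  rw [pyParse_eq]
  set d := List.foldl (fun cs row => cs.insert (rowCardA row) ((1 : Int), rowWinsA row)) PySem.Dict.empty L with hd
  have hndk : (L.map rowCardA).Nodup := by
    rw [← pvRowKey_eq_rowCardA]; exact hnd
  have hitems : d.items = L.map (fun row => (rowCardA row, ((1 : Int), rowWinsA row))) := by
    rw [hd]
    have h := PySem.Dict.items_foldl_insert_fresh L rowCardA (fun row => ((1 : Int), rowWinsA row))
      PySem.Dict.empty (fun a _ => PySem.Dict.contains_empty (rowCardA a)) hndk
    simpa using h
  have hkeys : d.keys = L.map rowCardA := by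
    simp only [PySem.Dict.keys, hitems, List.map_map]
    apply List.map_congr_left
    intro x _
    simp only [Function.comp_apply]
  set rest := L.map (fun row => (rowCardA row, (1 : Int), rowWinsA row)) with hrest
  have hrk : rest.map (·.1) = L.map rowCardA := by
    rw [hrest, List.map_map]
    apply List.map_congr_left
    intro x _
    simp only [Function.comp_apply]
  have hdnodup : d.keys.Nodup := by rw [hkeys]; exact hndk
  have hc : ∀ e ∈ rest, d.contains e.1 = true := by
    intro e he
    obtain ⟨row, hrow, rfl⟩ := List.mem_map.mp he
    refine (PySem.Dict.contains_iff_mem_keys d _).mpr ?_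
    rw [hkeys]
    exact List.mem_map.mpr ⟨row, hrow, by simp⟩
  have hv : ∀ e ∈ rest, d.getD e.1 (0, 0) = (e.2.1, e.2.2) := by
    intro e he
    obtain ⟨row, hrow, rfl⟩ := List.mem_map.mp he
    have hmem : (rowCardA row, ((1 : Int), rowWinsA row)) ∈ d.items := by
      rw [hitems]
      exact List.mem_map.mpr ⟨row, hrow, by simp⟩
    have h := PySem.Dict.getD_of_mem_items d hmem hdnodup (0, 0)
    simpa using h
  rw [hkeys, ← hrk, outerA rest.length rest le_rfl d 0 hc hv (by rw [hrk]; exact hndk), zero_add]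
  unfold calculate_alt
  rw [altParse_eq, List.nil_append, altCounts_eq_pulls, List.map_map,
    ← pureSum_eq_pulls (L.map ((fun cw => (cw.1, (1 : Int), cw.2)) ∘ fun row => (rowCardA row, rowWinsB row))).length _ le_rfl]
  rw [hrest]
  apply congrArg
  apply List.map_congr_left
  intro row _
  simp [Function.comp, wins_eq row]
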